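-- pv_equiv track=rewrite | github.com/ming-xwolf/music-manager | genai/filename_analyzer.py | get_analysis_stats
-- ===== SOURCE A (Python) =====
-- from typing import Dict, Optional, List
--
-- def get_analysis_stats(results: List[Dict[str, str]]) -> Dict[str, int]:
--     """
--     获取分析统计信息
--
--     Args:
--         results: 分析结果列表
--
--     Returns:
--         Dict: 统计信息
--     """
--     stats = {
--         "total_files": len(results),
--         "standard_format": 0,
--         "needs_analysis": 0,
--         "analysis_success": 0,
--         "analysis_failed": 0,
--         "skipped": 0
--     }
--
--     for result in results:
--         if result.get("is_standard_format", False):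
--             stats["standard_format"] += 1
--             stats["skipped"] += 1
--         elif result.get("needs_analysis", False):
--             stats["needs_analysis"] += 1
--             if "error" in result:
--                 stats["analysis_failed"] += 1
--             else:
--                 stats["analysis_success"] += 1
--
--     return stats
-- ===== SOURCE B (Python) =====
-- from typing import Dict, List
--
-- def get_analysis_stats(results: List[Dict[str, str]]) -> Dict[str, int]:
--     standard = sum(1 for r in results if r.get("is_standard_format", False))
--     pending = [r for r in results
--                if not r.get("is_standard_format", False) and r.get("needs_analysis", False)]
--     failed = sum(1 for r in pending if "error" in r)
--     return {
--         "total_files": len(results),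
--         "standard_format": standard,
--         "needs_analysis": len(pending),
--         "analysis_success": len(pending) - failed,
--         "analysis_failed": failed,
--         "skipped": standard,
--     }
-- ===== Notes on version B (the rewrite author's own statement) =====
-- stated objective: alternative
-- what changed: Replaces the mutable stats dict updated by a single branching loop with per-statistic count comprehensions (standard/skipped as one count, pending filtered once, failed counted on it, success derived by subtraction) assembled into a dict literal.
import Mathlib
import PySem

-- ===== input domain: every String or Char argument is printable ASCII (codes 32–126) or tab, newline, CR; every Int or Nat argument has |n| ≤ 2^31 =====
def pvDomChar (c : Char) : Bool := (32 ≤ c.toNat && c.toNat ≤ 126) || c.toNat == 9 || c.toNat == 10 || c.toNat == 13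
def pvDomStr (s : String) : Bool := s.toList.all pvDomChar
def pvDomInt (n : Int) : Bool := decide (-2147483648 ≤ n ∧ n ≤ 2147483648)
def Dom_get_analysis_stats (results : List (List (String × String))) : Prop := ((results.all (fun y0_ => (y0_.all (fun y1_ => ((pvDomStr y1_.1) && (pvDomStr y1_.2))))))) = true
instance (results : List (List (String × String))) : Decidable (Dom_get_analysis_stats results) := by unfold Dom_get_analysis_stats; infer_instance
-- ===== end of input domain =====

-- B replaces A's mutable stats dict updated by one branching loop with per-statistic counts
-- assembled into a dict literal (alternative decomposition, same O(n) cost).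

-- ===== PORT A =====
-- result.get(k, False) is truthy iff k maps (first match) to a nonempty string
def pvTruthyGet (r : List (String × String)) (k : String) : Bool :=
  match (PySem.Dict.mk r).get? k with
  | some v => v ≠ ""
  | none => false

def pvStepA (d : PySem.Dict String Int) (r : List (String × String)) : PySem.Dict String Int :=
  if pvTruthyGet r "is_standard_format" then
    (d.modify "standard_format" 0 (· + 1)).modify "skipped" 0 (· + 1)
  else if pvTruthyGet r "needs_analysis" then
    let d' := d.modify "needs_analysis" 0 (· + 1)
    if (PySem.Dict.mk r).contains "error" then d'.modify "analysis_failed" 0 (· + 1)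
    else d'.modify "analysis_success" 0 (· + 1)
  else d

def get_analysis_stats (results : List (List (String × String))) : List (String × Int) :=
  (results.foldl pvStepA
    (PySem.Dict.mk [("total_files", (results.length : Int)), ("standard_format", 0),
                    ("needs_analysis", 0), ("analysis_success", 0),
                    ("analysis_failed", 0), ("skipped", 0)])).items

-- ===== PORT B =====
def pvBTruthy (r : List (String × String)) (k : String) : Bool :=
  match (PySem.Dict.mk r).get? k with
  | some v => v ≠ ""
  | none => false

def get_analysis_stats_alt (results : List (List (String × String))) : List (String × Int) :=
  let standard : Int := (results.countP (fun r => pvBTruthy r "is_standard_format") : Int)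
  let pending := results.filter
    (fun r => !pvBTruthy r "is_standard_format" && pvBTruthy r "needs_analysis")
  let failed : Int := (pending.countP (fun r => (PySem.Dict.mk r).contains "error") : Int)
  [("total_files", (results.length : Int)), ("standard_format", standard),
   ("needs_analysis", (pending.length : Int)),
   ("analysis_success", (pending.length : Int) - failed),
   ("analysis_failed", failed), ("skipped", standard)]

-- ===== PRECONDITION & SPEC =====
def Spec_get_analysis_stats (results : List (List (String × String))) (out : List (String × Int)) : Prop := out = get_analysis_stats_alt results
instance (results : List (List (String × String))) (out : List (String × Int)) : Decidable (Spec_get_analysis_stats results out) := by unfold Spec_get_analysis_stats; infer_instance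

-- ===== CLAIM (what is proved, stated in full; the proofs are below) =====
def Claim_equal_get_analysis_stats : Prop := ∀ (results : List (List (String × String))), Dom_get_analysis_stats results → Spec_get_analysis_stats results (get_analysis_stats results)

-- ===== LEMMAS AND PROOFS =====

-- loop invariant: A's fold over a literal six-key dict adds the three independent counts
theorem pvLoopA (rs : List (List (String × String))) :
    ∀ t s n su f sk : Int,
    rs.foldl pvStepA
      (PySem.Dict.mk [("total_files", t), ("standard_format", s), ("needs_analysis", n),
                      ("analysis_success", su), ("analysis_failed", f), ("skipped", sk)]) =
    PySem.Dict.mk [("total_files", t),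
      ("standard_format", s + (rs.countP (fun r => pvTruthyGet r "is_standard_format") : Int)),
      ("needs_analysis", n + (rs.countP (fun r => !pvTruthyGet r "is_standard_format" && pvTruthyGet r "needs_analysis") : Int)),
      ("analysis_success", su + (rs.countP (fun r => !pvTruthyGet r "is_standard_format" && pvTruthyGet r "needs_analysis" && !(PySem.Dict.mk r).contains "error") : Int)),
      ("analysis_failed", f + (rs.countP (fun r => !pvTruthyGet r "is_standard_format" && pvTruthyGet r "needs_analysis" && (PySem.Dict.mk r).contains "error") : Int)),
      ("skipped", sk + (rs.countP (fun r => pvTruthyGet r "is_standard_format") : Int))] := by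
  induction rs with
  | nil => intro t s n su f sk; simp [List.countP]
  | cons r rs ih =>
    intro t s n su f sk
    simp only [List.foldl_cons, List.countP_cons]
    by_cases h1 : pvTruthyGet r "is_standard_format" = true
    · rw [show pvStepA (PySem.Dict.mk [("total_files", t), ("standard_format", s), ("needs_analysis", n),
          ("analysis_success", su), ("analysis_failed", f), ("skipped", sk)]) r =
          PySem.Dict.mk [("total_files", t), ("standard_format", s + 1), ("needs_analysis", n),
          ("analysis_success", su), ("analysis_failed", f), ("skipped", sk + 1)] by
            simp [pvStepA, h1, PySem.Dict.modify]; rfl]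
      rw [ih]
      simp [h1]; constructor <;> ring
    · by_cases h2 : pvTruthyGet r "needs_analysis" = true
      · by_cases h3 : (PySem.Dict.mk r).contains "error" = true
        · rw [show pvStepA (PySem.Dict.mk [("total_files", t), ("standard_format", s), ("needs_analysis", n),
              ("analysis_success", su), ("analysis_failed", f), ("skipped", sk)]) r =
              PySem.Dict.mk [("total_files", t), ("standard_format", s), ("needs_analysis", n + 1),
              ("analysis_success", su), ("analysis_failed", f + 1), ("skipped", sk)] by
                simp [pvStepA, h1, h2, h3, PySem.Dict.modify]; rfl]
          rw [ih]
          simp [h1, h2, h3]; constructor <;> ring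
        · rw [show pvStepA (PySem.Dict.mk [("total_files", t), ("standard_format", s), ("needs_analysis", n),
              ("analysis_success", su), ("analysis_failed", f), ("skipped", sk)]) r =
              PySem.Dict.mk [("total_files", t), ("standard_format", s), ("needs_analysis", n + 1),
              ("analysis_success", su + 1), ("analysis_failed", f), ("skipped", sk)] by
                simp [pvStepA, h1, h2, h3, PySem.Dict.modify]; rfl]
          rw [ih]
          simp [h1, h2, h3]; constructor <;> ring
      · rw [show pvStepA (PySem.Dict.mk [("total_files", t), ("standard_format", s), ("needs_analysis", n),
            ("analysis_success", su), ("analysis_failed", f), ("skipped", sk)]) r =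
            PySem.Dict.mk [("total_files", t), ("standard_format", s), ("needs_analysis", n),
            ("analysis_success", su), ("analysis_failed", f), ("skipped", sk)] by
              simp [pvStepA, h1, h2]]
        rw [ih]
        simp [h1, h2]

theorem pvBTruthy_eq : pvBTruthy = pvTruthyGet := rfl

-- pending-based counts of B coincide with A's nested-guard counts
theorem pvCounts (rs : List (List (String × String))) :
    let pNA := fun r => !pvTruthyGet r "is_standard_format" && pvTruthyGet r "needs_analysis"
    let pending := rs.filter pNA
    ((pending.length : Int) = (rs.countP pNA : Int)) ∧
    ((pending.countP (fun r => (PySem.Dict.mk r).contains "error") : Int) =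
      (rs.countP (fun r => pNA r && (PySem.Dict.mk r).contains "error") : Int)) ∧
    ((pending.length : Int) - (pending.countP (fun r => (PySem.Dict.mk r).contains "error") : Int) =
      (rs.countP (fun r => pNA r && !(PySem.Dict.mk r).contains "error") : Int)) := by
  intro pNA pending
  refine ⟨by simp [pending, ← List.countP_eq_length_filter], ?_, ?_⟩
  · simp [pending, List.countP_filter, Bool.and_comm]
  · have h0 := List.length_eq_countP_add_countP (l := pending) (p := fun r => (PySem.Dict.mk r).contains "error")
    simp only [decide_not, Bool.decide_eq_true] at h0
    have h2 : pending.countP (fun r => !(PySem.Dict.mk r).contains "error")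
        = rs.countP (fun r => pNA r && !(PySem.Dict.mk r).contains "error") := by
      simp [pending, List.countP_filter, Bool.and_comm]
    have h1 : pending.length = rs.countP pNA := by
      simp [pending, ← List.countP_eq_length_filter]
    omega

-- ===== VERDICT (by name: the statement is the Claim_ definition above) =====
theorem get_analysis_stats_spec : Claim_equal_get_analysis_stats := by
  intro results _
  unfold Spec_get_analysis_stats get_analysis_stats get_analysis_stats_alt
  rw [pvLoopA]
  obtain ⟨h1, h2, h3⟩ := pvCounts results
  simp only [pvBTruthy_eq, zero_add]
  beta_reduce at h1 h2 h3
  have key : (results.countP (fun r => !pvTruthyGet r "is_standard_format" && pvTruthyGet r "needs_analysis" && !(PySem.Dict.mk r).contains "error") : Int) =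
      (results.countP (fun r => !pvTruthyGet r "is_standard_format" && pvTruthyGet r "needs_analysis") : Int) -
      (results.countP (fun r => !pvTruthyGet r "is_standard_format" && pvTruthyGet r "needs_analysis" && (PySem.Dict.mk r).contains "error") : Int) := by
    omega
  rw [key, h1, h2]
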